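-- pv_equiv track=rewrite | github.com/cyruscyliu/llbic | bin/dependency.py | parse_ar_target_and_sources
-- ===== SOURCE A (Python) =====
-- def parse_ar_target_and_sources(command_split):
--     """
--     ar rcsD drivers/amba/built-in.o
--     ar rcsD arch/mips/math-emu/lib.a arch/mips/math-emu/dp_sqrt.o arch/mips/math-emu/ieee754d.o arch/mips/math-emu/sp_sqrt.o
--     """
--     target_and_sources = []
--     for item in reversed(command_split):
--         if item.endswith('-ar'):
--             break
--         target_and_sources.append(item)
--     target = target_and_sources[-2]
--     sources = target_and_sources[:-2]
--     return target, sources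
-- ===== SOURCE B (Python) =====
-- def parse_ar_target_and_sources(command_split):
--     idx = -1
--     for j, item in enumerate(command_split):
--         if item.endswith('-ar'):
--             idx = j
--     target = command_split[idx + 2]
--     sources = command_split[idx + 3:][::-1]
--     return target, sources
-- ===== Notes on version B (the rewrite author's own statement) =====
-- stated objective: alternative
-- what changed: B replaces A's reversed-iteration accumulator loop (append until an item ending in '-ar', then negative indexing into the accumulated list) by a forward scan that records the index of the rightmost '-ar' item and reads target and sources directly out of the original list with index arithmetic and slices.
import Mathlib
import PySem

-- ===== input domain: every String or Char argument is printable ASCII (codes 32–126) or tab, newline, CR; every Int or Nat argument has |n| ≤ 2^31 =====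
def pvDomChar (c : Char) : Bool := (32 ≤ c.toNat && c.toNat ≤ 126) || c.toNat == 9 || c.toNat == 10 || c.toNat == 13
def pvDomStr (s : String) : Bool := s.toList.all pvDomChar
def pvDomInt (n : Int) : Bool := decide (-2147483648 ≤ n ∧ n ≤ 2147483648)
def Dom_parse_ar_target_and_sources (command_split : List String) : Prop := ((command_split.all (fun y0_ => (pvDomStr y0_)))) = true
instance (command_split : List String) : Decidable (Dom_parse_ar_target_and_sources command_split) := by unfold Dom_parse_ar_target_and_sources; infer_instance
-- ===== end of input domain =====

-- B replaces A's reversed accumulator loop by a forward rightmost-'-ar'-index scan plus direct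
-- index/slice arithmetic on the original list (objective: alternative decomposition, same cost).


-- ===== PORT A =====
-- the 'for item in reversed(command_split): if item.endswith('-ar'): break; target_and_sources.append(item)' loop
def parseA_loop : List String → List String → List String
  | [], acc => acc
  | x :: xs, acc =>
      if PySem.Str.endswith x "-ar" = true then acc else parseA_loop xs (acc ++ [x])

def parse_ar_target_and_sources (command_split : List String) : String × List String :=
  let target_and_sources := parseA_loop command_split.reverse []
  (PySem.List.pyGetD target_and_sources (-2) "",
   PySem.List.slice target_and_sources none (some (-2)))

-- ===== PORT B =====
-- 'idx = -1; for j, item in enumerate(command_split): if item.endswith('-ar'): idx = j'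
def lastArIdx (command_split : List String) : Int :=
  (PySem.List.enumerate command_split 0).foldl
    (fun idx ji => if PySem.Str.endswith ji.2 "-ar" = true then ji.1 else idx) (-1)

def parse_ar_target_and_sources_alt (command_split : List String) : String × List String :=
  let idx := lastArIdx command_split
  (PySem.List.pyGetD command_split (idx + 2) "",
   (PySem.List.slice? (PySem.List.slice command_split (some (idx + 3)) none) none none (-1)).getD [])

-- ===== PRECONDITION & SPEC =====
-- On an input whose maximal '-ar'-free suffix is shorter than 2 items Python A raises IndexError
-- (target_and_sources[-2]); B raises IndexError there too; Pre_ excludes exactly those inputs.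
def Pre_parse_ar_target_and_sources (command_split : List String) : Prop :=
  2 ≤ command_split.length ∧
    ∀ s ∈ command_split.drop (command_split.length - 2), PySem.Str.endswith s "-ar" = false
instance (command_split : List String) : Decidable (Pre_parse_ar_target_and_sources command_split) := by
  unfold Pre_parse_ar_target_and_sources; infer_instance

def pvWitness_parse_ar_target_and_sources : List String :=
  ["gcc-ar", "rcsD", "lib.a", "a.o", "b.o"]

def Spec_parse_ar_target_and_sources (command_split : List String) (out : String × List String) : Prop := out = parse_ar_target_and_sources_alt command_split
instance (command_split : List String) (out : String × List String) : Decidable (Spec_parse_ar_target_and_sources command_split out) := by unfold Spec_parse_ar_target_and_sources; infer_instance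

-- ===== CLAIM (what is proved, stated in full; the proofs are below) =====
def Claim_equal_parse_ar_target_and_sources : Prop := ∀ (command_split : List String), Dom_parse_ar_target_and_sources command_split → Pre_parse_ar_target_and_sources command_split → Spec_parse_ar_target_and_sources command_split (parse_ar_target_and_sources command_split)

-- ===== LEMMAS AND PROOFS =====

theorem parseA_loop_acc (items acc : List String) :
    parseA_loop items acc = acc ++ parseA_loop items [] := by
  induction items generalizing acc with
  | nil => simp [parseA_loop]
  | cons x xs ih =>
      simp only [parseA_loop]
      split
      · simp
      · rw [ih (acc ++ [x]), ih ([] ++ [x])]; simp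

theorem parseA_loop_eq_takeWhile (items : List String) :
    parseA_loop items [] = items.takeWhile (fun x => !PySem.Str.endswith x "-ar") := by
  induction items with
  | nil => simp [parseA_loop]
  | cons x xs ih =>
      simp only [parseA_loop, List.takeWhile_cons]
      by_cases h : PySem.Str.endswith x "-ar" = true
      · simp at h; simp [h]
      · simp at h
        rw [parseA_loop_acc]
        simp [h, ih]

theorem lastArIdx_append (l : List String) (x : String) :
    lastArIdx (l ++ [x]) =
      if PySem.Str.endswith x "-ar" = true then (l.length : Int) else lastArIdx l := by
  simp [lastArIdx, PySem.List.enumerate_append, List.foldl_append, PySem.List.enumerate]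

theorem lastArIdx_spec (l : List String) :
    lastArIdx l = -1 ∨
      ∃ (j : Nat) (_ : j < l.length), lastArIdx l = (j : Int) ∧
        PySem.Str.endswith l[j] "-ar" = true := by
  induction l using List.reverseRecOn with
  | nil => left; rfl
  | append_singleton l x ih =>
      rw [lastArIdx_append]
      by_cases h : PySem.Str.endswith x "-ar" = true
      · right
        have hjlt : l.length < (l ++ [x]).length := by simp
        refine ⟨l.length, hjlt, ?_, ?_⟩
        · rw [if_pos h]
        · rw [List.getElem_concat_length] <;> first | exact h | rfl
      · rw [if_neg h]
        rcases ih with h1 | ⟨j, hj, he, hp⟩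
        · left; exact h1
        · right
          refine ⟨j, by simp only [List.length_append, List.length_cons, List.length_nil]; omega,
            he, ?_⟩
          rwa [List.getElem_append_left hj]

theorem lastArIdx_bounds (l : List String) :
    -1 ≤ lastArIdx l ∧ lastArIdx l < l.length := by
  rcases lastArIdx_spec l with h | ⟨j, hj, he, _⟩
  · constructor <;> omega
  · rw [he]; constructor <;> omega

theorem key_suffix (l : List String) :
    l.reverse.takeWhile (fun x => !PySem.Str.endswith x "-ar")
      = (l.drop (lastArIdx l + 1).toNat).reverse := by
  induction l using List.reverseRecOn with
  | nil => rfl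
  | append_singleton l x ih =>
      rw [List.reverse_append, lastArIdx_append]
      by_cases h : PySem.Str.endswith x "-ar" = true
      · rw [if_pos h]
        have h1 : (((l.length : Int)) + 1).toNat = l.length + 1 := by omega
        rw [h1]
        have hd : List.drop (l.length + 1) (l ++ [x]) = [] := by
          have h2 : (l ++ [x]).length = l.length + 1 := by simp
          rw [← h2, List.drop_length]
        simp at h
        simp [h, hd]
      · rw [if_neg h]
        have hb := lastArIdx_bounds l
        have hle : (lastArIdx l + 1).toNat ≤ l.length := by omega
        simp at h ih
        rw [List.drop_append_of_le_length hle, List.reverse_append]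
        simp [h, ih]

theorem lastArIdx_small (l : List String)
    (hpre : Pre_parse_ar_target_and_sources l) : lastArIdx l + 3 ≤ l.length := by
  obtain ⟨hlen, hnoar⟩ := hpre
  rcases lastArIdx_spec l with h | ⟨j, hj, he, hp⟩
  · omega
  · rw [he]
    by_contra hcon
    have hjge : l.length - 2 ≤ j := by omega
    have h9 : (l.drop (l.length - 2))[j - (l.length - 2)]? = some l[j] := by
      rw [List.getElem?_drop, show l.length - 2 + (j - (l.length - 2)) = j from by omega,
        List.getElem?_eq_getElem hj]
    have hmem : l[j] ∈ l.drop (l.length - 2) := List.mem_of_getElem? h9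
    rw [hnoar _ hmem] at hp
    exact absurd hp (by decide)

-- ===== VERDICT (by name: the statement is the Claim_ definition above) =====
theorem parse_ar_target_and_sources_spec : Claim_equal_parse_ar_target_and_sources := by
  intro l _hdom hpre
  unfold Spec_parse_ar_target_and_sources
  unfold parse_ar_target_and_sources parse_ar_target_and_sources_alt
  have hb := lastArIdx_bounds l
  have hsmall := lastArIdx_small l hpre
  set idx := lastArIdx l with hidx
  set n : Nat := (idx + 1).toNat with hn
  have hni : (n : Int) = idx + 1 := by omega
  have hnlen : n + 2 ≤ l.length := by omega
  rw [Prod.ext_iff]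
  dsimp only
  rw [parseA_loop_eq_takeWhile, key_suffix, ← hidx, ← hn]
  set s : List String := l.drop n with hs
  have hslen : 2 ≤ s.length := by rw [hs, List.length_drop]; omega
  have hlen : s.reverse.length = s.length := by simp
  constructor
  · -- target component
    rw [PySem.List.pyGetD_neg_ofNat s.reverse 2 "" (by omega) (by rw [hlen]; omega)]
    have hA : PySem.List.pyGetD l (idx + 2) "" = l[(idx + 2).toNat] :=
      PySem.List.pyGetD_eq_getElem l "" (by omega) (by omega)
    rw [hA]
    rw [List.getElem_reverse]
    have h2 : (idx + 2).toNat = n + 1 := by omega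
    simp only [hlen, h2]
    have h3 : s.length - 1 - (s.length - 2) = 1 := by omega
    simp only [h3]
    simp only [hs, List.getElem_drop]
  · -- sources component
    rw [PySem.List.slice_to_neg_ofNat s.reverse 2 (by omega)]
    have hB := PySem.List.slice_from l (a := idx + 3) (by omega)
    rw [hB, PySem.List.slice?_none_none_neg_one, Option.getD_some]
    have h4 : (idx + 3).toNat = n + 2 := by omega
    rw [h4, hlen, List.take_reverse]
    have h5 : s.length - (s.length - 2) = 2 := by omega
    rw [h5, hs, List.drop_drop]
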